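-- pv_equiv track=rewrite | github.com/teamwork-challenge/platform | tasks/decoding/router.py | check_student_answer_huffman
-- ===== SOURCE A (Python) =====
-- from typing import Dict, Tuple, List
--
-- def is_binary_string(s: str) -> bool:
--     return all(ch in '01' for ch in s)
--
-- def is_prefix_free(codes: List[str]) -> bool:
--     # Sort codes by length, then check if any code is prefix of another
--     sorted_codes = sorted(codes, key=len)
--     for i in range(len(sorted_codes)):
--         for j in range(i + 1, len(sorted_codes)):
--             if sorted_codes[j].startswith(sorted_codes[i]):
--                 return False
--     return True
--
-- def check_student_answer_huffman(minimal_bits_number: int, student_answer: str) -> Tuple[bool, str]: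
--     lines = student_answer.strip().split('\n')
--     try:
--         n = int(lines[0])
--     except (ValueError, IndexError):
--         return False, "First line must be integer number of encoded symbols N"
--
--     if n > 26:
--         return False, f"Too many encoded symbols: {n}"
--
--     if len(lines) != n + 2:
--         return False, f"Expected {n} code lines + encoded text, got {len(lines) - 1}"
--
--     char_code_lines = lines[1:1 + n]
--     encoded_text = lines[-1]
--
--     # Parse codes
--     codes = {}
--     for line in char_code_lines:
--         if len(line.strip().split()) != 2:
--             return False, f"Invalid code line format: '{line}'. Expected format: 'a 1001\nb 11\n..."
--         ch, code = line.strip().split()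
--         if len(ch) != 1 or not ch.isalpha() or not ch.islower():
--             return False, f"Invalid character: '{ch}'"
--         if not is_binary_string(code):
--             return False, f"Code for character '{ch}' is not binary: '{code}'"
--         if ch in codes:
--             return False, f"Duplicate character code for '{ch}'"
--         codes[ch] = code
--
--     # Check all codes are prefix free
--     if not is_prefix_free(list(codes.values())):
--         return False, "Codes are not prefix free"
--
--     # Check encoded text is binary only
--     if not is_binary_string(encoded_text):
--         return False, "Encoded text contains non-binary characters"
--
--     if len(encoded_text) != minimal_bits_number:
--         return False, "Encoding is not optimal, use less bits"
--
--     return True, "Code is binary, prefix-free, and optimal"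
-- ===== SOURCE B (Python) =====
-- def _prefix_free_trie(codes):
--     # binary trie node = [terminal?, child-for-'0', child-for-'1']
--     root = [False, None, None]
--     for code in codes:
--         node = root
--         for b in code:
--             if node[0]:          # an earlier code is a strict prefix of this one
--                 return False
--             k = 1 if b == '0' else 2
--             if node[k] is None:
--                 node[k] = [False, None, None]
--             node = node[k]
--         if node[0] or node[1] is not None or node[2] is not None:
--             return False         # duplicate code, or this code is a prefix of an earlier one
--         node[0] = True
--     return True
--
--
-- def _parse_codes(code_lines):
--     codes = []
--     taken = set()
--     for line in code_lines:
--         fields = line.strip().split()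
--         if len(fields) != 2:
--             return None, f"Invalid code line format: '{line}'. Expected format: 'a 1001\nb 11\n..."
--         ch, code = fields
--         if len(ch) != 1 or not ('a' <= ch <= 'z'):
--             return None, f"Invalid character: '{ch}'"
--         if set(code) - {'0', '1'}:
--             return None, f"Code for character '{ch}' is not binary: '{code}'"
--         if ch in taken:
--             return None, f"Duplicate character code for '{ch}'"
--         taken.add(ch)
--         codes.append(code)
--     return codes, None
--
--
-- def _judge(target, lines):
--     try:
--         n = int(lines[0])
--     except ValueError:
--         return f"First line must be integer number of encoded symbols N"
--     if n > 26:
--         return f"Too many encoded symbols: {n}"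
--     if len(lines) != n + 2:
--         return f"Expected {n} code lines + encoded text, got {len(lines) - 1}"
--     codes, err = _parse_codes(lines[1:n + 1])
--     if err is not None:
--         return err
--     if not _prefix_free_trie(codes):
--         return "Codes are not prefix free"
--     encoded = lines[n + 1]
--     if set(encoded) - {'0', '1'}:
--         return "Encoded text contains non-binary characters"
--     if len(encoded) != target:
--         return "Encoding is not optimal, use less bits"
--     return None
--
--
-- def check_student_answer_huffman(minimal_bits_number, student_answer):
--     msg = _judge(minimal_bits_number, student_answer.strip().split('\n'))
--     if msg is None:
--         return True, "Code is binary, prefix-free, and optimal"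
--     return False, msg
-- ===== Notes on version B (the rewrite author's own statement) =====
-- stated objective: alternative
-- what changed: The prefix-free check builds a binary trie and detects a conflict during insertion (landing on a terminal node, or ending on a marked/branching node) instead of length-sorting the codes and running an all-pairs startswith scan, and the glue is restructured into an error-computing helper _judge returning Optional[str] plus a _parse_codes helper keeping a taken-set and code list instead of a dict, with the character test as an 'a' <= ch <= 'z' range comparison and binary tests as set differences.
import Mathlib
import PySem

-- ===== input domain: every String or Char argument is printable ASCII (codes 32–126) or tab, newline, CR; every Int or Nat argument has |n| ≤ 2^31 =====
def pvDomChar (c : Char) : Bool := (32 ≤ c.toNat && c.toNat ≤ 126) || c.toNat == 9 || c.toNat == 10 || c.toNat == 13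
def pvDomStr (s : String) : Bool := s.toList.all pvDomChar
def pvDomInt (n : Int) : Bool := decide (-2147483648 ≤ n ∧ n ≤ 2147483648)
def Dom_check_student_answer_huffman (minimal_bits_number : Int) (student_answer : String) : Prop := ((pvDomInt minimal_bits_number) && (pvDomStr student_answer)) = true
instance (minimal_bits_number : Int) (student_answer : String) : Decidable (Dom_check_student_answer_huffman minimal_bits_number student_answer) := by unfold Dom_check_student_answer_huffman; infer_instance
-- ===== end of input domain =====

-- B replaces A's length-sort + all-pairs startswith prefix check by a binary-trie insertion check and
-- restructures the glue into an error-computing helper returning Option String (objective: alternative).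

-- ===== PORT A =====

-- all(ch in '01' for ch in s): 'ch in "01"' on a single char is membership in {'0','1'} (exact)
def pvIsBinA (cs : List Char) : Bool := cs.all (fun c => c == '0' || c == '1')

-- str.islower(): some cased char and no uppercase cased char; exact on ASCII (cased = letters)
def pvStrIslower (cs : List Char) : Bool :=
  cs.any PySem.Chars.isalpha && cs.all (fun c => !PySem.Chars.isupper c)

-- the nested i/j loop of is_prefix_free: for each i, scan all later j for startswith
def pvPpfGo : List (List Char) → Bool
  | [] => true
  | c :: rest => rest.all (fun d => !PySem.Chars.startswith d c) && pvPpfGo rest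

-- is_prefix_free: sort by length, then the all-pairs scan
def pvIsPrefixFreeA (codes : List (List Char)) : Bool :=
  pvPpfGo (PySem.List.sorted codes (fun s => s.length) false)

-- the 'for line in char_code_lines' loop of A: builds the codes dict or returns the first error
def pvParseA : List (List Char) → PySem.Dict (List Char) (List Char) →
    Sum (PySem.Dict (List Char) (List Char)) (Bool × String)
  | [], codes => .inl codes
  | line :: rest, codes =>
    match PySem.Chars.split₀ (PySem.Chars.strip line) with
    | [ch, code] =>
      if ch.length != 1 || !PySem.Chars.strIsalpha ch || !pvStrIslower ch then
        .inr (false, "Invalid character: '" ++ String.ofList ch ++ "'")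
      else if !pvIsBinA code then
        .inr (false, "Code for character '" ++ String.ofList ch ++ "' is not binary: '" ++ String.ofList code ++ "'")
      else if codes.contains ch then
        .inr (false, "Duplicate character code for '" ++ String.ofList ch ++ "'")
      else pvParseA rest (codes.insert ch code)
    | _ => .inr (false, "Invalid code line format: '" ++ String.ofList line ++ "'. Expected format: 'a 1001\nb 11\n...")

def check_student_answer_huffman (minimal_bits_number : Int) (student_answer : String) : Bool × String :=
  let lines := PySem.Chars.splitOn (PySem.Chars.strip student_answer.toList) ['\n']
  -- lines[0]: splitOn never returns [], so the IndexError branch of the 'except' is unreachable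
  match PySem.Int.ofChars? (lines.headD []) with
  | none => (false, "First line must be integer number of encoded symbols N")
  | some n =>
    if n > 26 then (false, "Too many encoded symbols: " ++ PySem.Int.toStr n)
    else if (lines.length : Int) != n + 2 then
      (false, "Expected " ++ PySem.Int.toStr n ++ " code lines + encoded text, got " ++ PySem.Int.toStr ((lines.length : Int) - 1))
    else
      let char_code_lines := PySem.List.slice lines (some 1) (some (1 + n))
      let encoded := (PySem.List.pyGet? lines (-1)).getD []   -- lines[-1]; lines is nonempty
      match pvParseA char_code_lines PySem.Dict.empty with
      | .inr err => err
      | .inl codes =>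
        if !pvIsPrefixFreeA codes.values then (false, "Codes are not prefix free")
        else if !pvIsBinA encoded then (false, "Encoded text contains non-binary characters")
        else if (encoded.length : Int) != minimal_bits_number then (false, "Encoding is not optimal, use less bits")
        else (true, "Code is binary, prefix-free, and optimal")

-- ===== PORT B =====

-- the nested-list trie node [term, child0, child1] of Source B; None children are .leaf
inductive PvTrie where
  | leaf
  | node (t : Bool) (z : PvTrie) (o : PvTrie)
deriving DecidableEq, Repr

-- 'if node[k] is None: node[k] = [False, None, None]'
def pvChild (T : PvTrie) : PvTrie :=
  match T with
  | .leaf => .node false .leaf .leaf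
  | x => x

-- the inner 'for b in code' walk of _prefix_free_trie, as path-copying insertion:
-- none = the walk returned False (prefix conflict), some = the updated trie
def pvIns : PvTrie → List Char → Option PvTrie
  | .node t z o, [] =>
      if t || decide (z ≠ .leaf) || decide (o ≠ .leaf) then none
      else some (.node true z o)
  | .node t z o, b :: bs =>
      if t then none
      else if b == '0' then (pvIns (pvChild z) bs).map (fun z' => .node t z' o)
      else (pvIns (pvChild o) bs).map (fun o' => .node t z o')
  | .leaf, _ => none   -- unreachable: the walk always starts at a node

-- the outer 'for code in codes' loop of _prefix_free_trie
def pvTrieGo : List (List Char) → PvTrie → Bool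
  | [], _ => true
  | c :: rest, T =>
      match pvIns T c with
      | none => false
      | some T' => pvTrieGo rest T'

def pvPrefixFreeTrie (codes : List (List Char)) : Bool :=
  pvTrieGo codes (.node false .leaf .leaf)

-- set(code) - {'0','1'}
def pvBinLeft (cs : List Char) : PySem.Set Char := PySem.Set.diff (PySem.Set.ofList cs) ['0', '1']

-- _parse_codes: codes list + taken set, first error as .inr
def pvParseB : List (List Char) → List (List Char) → PySem.Set (List Char) →
    Sum (List (List Char)) String
  | [], acc, _ => .inl acc
  | line :: rest, acc, taken =>
    match PySem.Chars.split₀ (PySem.Chars.strip line) with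
    | [ch, code] =>
      -- 'a' <= ch <= 'z' is ¬(ch < "a") ∧ ¬("z" < ch); Python str comparison = lex '<' on List Char
      if ch.length != 1 || !(!decide (ch < ['a']) && !decide (['z'] < ch)) then
        .inr ("Invalid character: '" ++ String.ofList ch ++ "'")
      else if decide (pvBinLeft code ≠ []) then
        .inr ("Code for character '" ++ String.ofList ch ++ "' is not binary: '" ++ String.ofList code ++ "'")
      else if PySem.Set.contains taken ch then
        .inr ("Duplicate character code for '" ++ String.ofList ch ++ "'")
      else pvParseB rest (acc ++ [code]) (PySem.Set.add taken ch)
    | _ => .inr ("Invalid code line format: '" ++ String.ofList line ++ "'. Expected format: 'a 1001\nb 11\n...")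

-- _judge: the first failing check's message, or none
def pvJudge (target : Int) (lines : List (List Char)) : Option String :=
  match PySem.Int.ofChars? (lines.headD []) with
  | none => some "First line must be integer number of encoded symbols N"
  | some n =>
    if n > 26 then some ("Too many encoded symbols: " ++ PySem.Int.toStr n)
    else if (lines.length : Int) != n + 2 then
      some ("Expected " ++ PySem.Int.toStr n ++ " code lines + encoded text, got " ++ PySem.Int.toStr ((lines.length : Int) - 1))
    else
      match pvParseB (PySem.List.slice lines (some 1) (some (n + 1))) [] PySem.Set.empty with
      | .inr err => some err
      | .inl codes =>
        if !pvPrefixFreeTrie codes then some "Codes are not prefix free"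
        else
          let encoded := PySem.List.pyGetD lines (n + 1) []   -- lines[n + 1]; in range: len(lines) = n + 2
          if decide (pvBinLeft encoded ≠ []) then some "Encoded text contains non-binary characters"
          else if (encoded.length : Int) != target then some "Encoding is not optimal, use less bits"
          else none

def check_student_answer_huffman_alt (minimal_bits_number : Int) (student_answer : String) : Bool × String :=
  match pvJudge minimal_bits_number (PySem.Chars.splitOn (PySem.Chars.strip student_answer.toList) ['\n']) with
  | none => (true, "Code is binary, prefix-free, and optimal")
  | some msg => (false, msg)

-- ===== PRECONDITION & SPEC =====
def Spec_check_student_answer_huffman (minimal_bits_number : Int) (student_answer : String) (out : Bool × String) : Prop := out = check_student_answer_huffman_alt minimal_bits_number student_answer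
instance (minimal_bits_number : Int) (student_answer : String) (out : Bool × String) : Decidable (Spec_check_student_answer_huffman minimal_bits_number student_answer out) := by unfold Spec_check_student_answer_huffman; infer_instance

-- ===== CLAIM (what is proved, stated in full; the proofs are below) =====
def Claim_equal_check_student_answer_huffman : Prop := ∀ (minimal_bits_number : Int) (student_answer : String), Dom_check_student_answer_huffman minimal_bits_number student_answer → Spec_check_student_answer_huffman minimal_bits_number student_answer (check_student_answer_huffman minimal_bits_number student_answer)


-- ===== LEMMAS AND PROOFS =====

-- the prefix-compatibility relation both prefix-free checks decide
def pvR (a b : List Char) : Prop := ¬ a <+: b ∧ ¬ b <+: a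

-- the set of codes stored in a trie (binary routing, as in Source B's node[1]/node[2])
def pvMem : PvTrie → List Char → Prop
  | .leaf, _ => False
  | .node t _ _, [] => t = true
  | .node _ z o, b :: bs => pvMem (if b = '0' then z else o) bs

def pvHasStored (T : PvTrie) : Prop := ∃ s, pvIsBinA s = true ∧ pvMem T s

-- well-formedness of tries built by successful inserts: non-leaf children store something
def pvWF : PvTrie → Prop
  | .leaf => True
  | .node _ z o => pvWF z ∧ pvWF o ∧ (z ≠ .leaf → pvHasStored z) ∧ (o ≠ .leaf → pvHasStored o)

lemma pvMem_fresh (s : List Char) : ¬ pvMem (.node false .leaf .leaf) s := by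
  cases s with
  | nil => simp [pvMem]
  | cons b bs => simp only [pvMem]; split <;> simp [pvMem]

lemma pvMem_child (T : PvTrie) (s : List Char) : pvMem (pvChild T) s ↔ pvMem T s := by
  cases T with
  | leaf => simp [pvChild, pvMem_fresh, pvMem]
  | node t z o => rfl

lemma pvWF_child (T : PvTrie) (h : pvWF T) : pvWF (pvChild T) := by
  cases T with
  | leaf => exact ⟨trivial, trivial, fun h => absurd rfl h, fun h => absurd rfl h⟩
  | node t z o => exact h

lemma pvChild_node (T : PvTrie) : ∃ t z o, pvChild T = .node t z o := by
  cases T with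
  | leaf => exact ⟨false, .leaf, .leaf, rfl⟩
  | node t z o => exact ⟨t, z, o, rfl⟩

-- insertion: none exactly when a prefix conflict with a stored code exists; on success the
-- stored set grows by the inserted code, and well-formedness is preserved
lemma pv_ins_spec (c : List Char) : ∀ (t : Bool) (z o : PvTrie), pvIsBinA c = true → pvWF (.node t z o) →
    (pvIns (.node t z o) c = none ↔
      ∃ s, pvIsBinA s = true ∧ pvMem (.node t z o) s ∧ (s <+: c ∨ c <+: s)) ∧
    (∀ T', pvIns (.node t z o) c = some T' →
      (∃ t' z' o', T' = .node t' z' o') ∧ pvWF T' ∧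
      ∀ s, pvIsBinA s = true → (pvMem T' s ↔ pvMem (.node t z o) s ∨ s = c)) := by
  induction c with
  | nil =>
    intro t z o _ hwf
    constructor
    · simp only [pvIns]
      constructor
      · intro h
        split_ifs at h with hc
        simp only [Bool.or_eq_true, decide_eq_true_eq] at hc
        rcases hc with (ht | hz) | ho
        · exact ⟨[], rfl, by simpa [pvMem] using ht, .inl List.prefix_rfl⟩
        · obtain ⟨s, hbs, hms⟩ := hwf.2.2.1 hz
          exact ⟨'0' :: s, by simpa [pvIsBinA] using hbs,
            by simpa [pvMem] using hms, .inr (List.nil_prefix)⟩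
        · obtain ⟨s, hbs, hms⟩ := hwf.2.2.2 ho
          exact ⟨'1' :: s, by simpa [pvIsBinA] using hbs,
            by simpa [pvMem] using hms, .inr (List.nil_prefix)⟩
      · rintro ⟨s, hbs, hms, hrel⟩
        by_cases ht : t = true
        · simp [ht]
        cases s with
        | nil => simp [pvMem, ht] at hms
        | cons b bs =>
          have hzo : (if b = '0' then z else o) ≠ .leaf := by
            intro he
            rw [pvMem, he] at hms
            simp [pvMem] at hms
          split at hzo
          · simp [hzo]
          · simp [hzo]
    · intro T' hT'
      simp only [pvIns] at hT'
      split_ifs at hT' with hc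
      obtain ⟨⟨rfl, rfl⟩, rfl⟩ : (t = false ∧ z = PvTrie.leaf) ∧ o = PvTrie.leaf := by
        simp only [Bool.or_eq_true, decide_eq_true_eq] at hc
        constructor
        · constructor
          · rcases t with _ | _ <;> simp_all
          · by_contra hzz; exact hc (.inl (.inr hzz))
        · by_contra hoo; exact hc (.inr hoo)
      obtain rfl : T' = .node true .leaf .leaf := by simpa using hT'.symm
      refine ⟨⟨true, .leaf, .leaf, rfl⟩,
        ⟨trivial, trivial, fun h => absurd rfl h, fun h => absurd rfl h⟩, ?_⟩
      intro s hbs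
      cases s with
      | nil => simp [pvMem]
      | cons b bs => simp only [pvMem]; split <;> simp [pvMem]
  | cons b bs ih =>
    intro t z o hbin hwf
    have hbb : b = '0' ∨ b = '1' := by
      have := (List.all_eq_true.mp hbin) b (by simp)
      rcases Bool.or_eq_true _ _ |>.mp this with h | h
      · exact .inl (by simpa using h)
      · exact .inr (by simpa using h)
    have hbs : pvIsBinA bs = true := by
      simp only [pvIsBinA, List.all_cons, Bool.and_eq_true] at hbin
      exact hbin.2
    by_cases ht : t = true
    · subst ht
      constructor
      · simp only [pvIns]
        constructor
        · intro _
          exact ⟨[], rfl, by simp [pvMem], .inl List.nil_prefix⟩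
        · intro _; rfl
      · intro T' hT'
        simp [pvIns] at hT'
    · have ht' : t = false := by simpa using ht
      subst ht'
      -- the subtree the walk descends into, and the untouched sibling
      rcases hbb with rfl | rfl
      · -- b = '0'
        obtain ⟨ty, zy, oy, hchild⟩ := pvChild_node z
        have hwfc : pvWF (pvChild z) := pvWF_child z hwf.1
        have IH := ih ty zy oy hbs (by rw [← hchild]; exact hwfc)
        rw [← hchild] at IH
        have hstep : pvIns (.node false z o) ('0' :: bs) =
            (pvIns (pvChild z) bs).map (fun z' => .node false z' o) := by
          simp [pvIns]
        constructor
        · rw [hstep]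
          constructor
          · intro h
            obtain ⟨s, hb', hm', hrel⟩ := IH.1.mp (Option.map_eq_none_iff.mp h)
            refine ⟨'0' :: s, by simpa [pvIsBinA] using hb', by
              simpa [pvMem, pvMem_child] using hm', ?_⟩
            rcases hrel with h1 | h2
            · exact .inl (List.cons_prefix_cons.mpr ⟨rfl, h1⟩)
            · exact .inr (List.cons_prefix_cons.mpr ⟨rfl, h2⟩)
          · rintro ⟨s, hb', hm', hrel⟩
            cases s with
            | nil => simp [pvMem] at hm'
            | cons b' s0 =>
              obtain rfl : b' = '0' := by
                rcases hrel with h1 | h2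
                · exact (List.cons_prefix_cons.mp h1).1
                · exact (List.cons_prefix_cons.mp h2).1.symm
              have hm0 : pvMem (pvChild z) s0 := by
                rw [pvMem_child]
                simpa [pvMem] using hm'
              have hrel0 : s0 <+: bs ∨ bs <+: s0 := by
                rcases hrel with h1 | h2
                · exact .inl (List.cons_prefix_cons.mp h1).2
                · exact .inr (List.cons_prefix_cons.mp h2).2
              rw [Option.map_eq_none_iff]
              exact IH.1.mpr ⟨s0, by simpa [pvIsBinA] using hb', hm0, hrel0⟩
        · intro T' hT'
          rw [hstep] at hT'
          obtain ⟨z', hz', rfl⟩ := Option.map_eq_some_iff.mp hT'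
          obtain ⟨hshape, hwf', hmem'⟩ := IH.2 z' hz'
          have hstored : pvHasStored z' := by
            refine ⟨bs, hbs, ?_⟩
            exact (hmem' bs hbs).mpr (.inr rfl)
          refine ⟨⟨false, z', o, rfl⟩,
            ⟨hwf', hwf.2.1, fun _ => hstored, hwf.2.2.2⟩, ?_⟩
          intro s hb'
          cases s with
          | nil => simp [pvMem]
          | cons b' s0 =>
            by_cases hb0 : b' = '0'
            · subst hb0
              have hb0s : pvIsBinA s0 = true := by
                simp only [pvIsBinA, List.all_cons, Bool.and_eq_true] at hb'
                exact hb'.2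
              have := hmem' s0 hb0s
              rw [pvMem_child] at this
              simp [pvMem, this]
            · simp [pvMem, hb0]
      · -- b = '1'
        obtain ⟨ty, zy, oy, hchild⟩ := pvChild_node o
        have hwfc : pvWF (pvChild o) := pvWF_child o hwf.2.1
        have IH := ih ty zy oy hbs (by rw [← hchild]; exact hwfc)
        rw [← hchild] at IH
        have hstep : pvIns (.node false z o) ('1' :: bs) =
            (pvIns (pvChild o) bs).map (fun o' => .node false z o') := by
          simp [pvIns]
        constructor
        · rw [hstep]
          constructor
          · intro h
            obtain ⟨s, hb', hm', hrel⟩ := IH.1.mp (Option.map_eq_none_iff.mp h)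
            refine ⟨'1' :: s, by simpa [pvIsBinA] using hb', by
              simpa [pvMem, pvMem_child] using hm', ?_⟩
            rcases hrel with h1 | h2
            · exact .inl (List.cons_prefix_cons.mpr ⟨rfl, h1⟩)
            · exact .inr (List.cons_prefix_cons.mpr ⟨rfl, h2⟩)
          · rintro ⟨s, hb', hm', hrel⟩
            cases s with
            | nil => simp [pvMem] at hm'
            | cons b' s0 =>
              obtain rfl : b' = '1' := by
                rcases hrel with h1 | h2
                · exact (List.cons_prefix_cons.mp h1).1
                · exact (List.cons_prefix_cons.mp h2).1.symm
              have hm0 : pvMem (pvChild o) s0 := by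
                rw [pvMem_child]
                simpa [pvMem] using hm'
              have hrel0 : s0 <+: bs ∨ bs <+: s0 := by
                rcases hrel with h1 | h2
                · exact .inl (List.cons_prefix_cons.mp h1).2
                · exact .inr (List.cons_prefix_cons.mp h2).2
              rw [Option.map_eq_none_iff]
              exact IH.1.mpr ⟨s0, by simpa [pvIsBinA] using hb', hm0, hrel0⟩
        · intro T' hT'
          rw [hstep] at hT'
          obtain ⟨o', ho', rfl⟩ := Option.map_eq_some_iff.mp hT'
          obtain ⟨hshape, hwf', hmem'⟩ := IH.2 o' ho'
          have hstored : pvHasStored o' := by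
            refine ⟨bs, hbs, ?_⟩
            exact (hmem' bs hbs).mpr (.inr rfl)
          refine ⟨⟨false, z, o', rfl⟩,
            ⟨hwf.1, hwf', hwf.2.2.1, fun _ => hstored⟩, ?_⟩
          intro s hb'
          cases s with
          | nil => simp [pvMem]
          | cons b' s0 =>
            by_cases hb0 : b' = '0'
            · subst hb0
              simp [pvMem]
            · have hb0s : pvIsBinA s0 = true := by
                simp only [pvIsBinA, List.all_cons, Bool.and_eq_true] at hb'
                exact hb'.2
              have hb1 : b' = '1' := by
                simp only [pvIsBinA, List.all_cons, Bool.and_eq_true, Bool.or_eq_true,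
                  beq_iff_eq] at hb'
                rcases hb'.1 with h | h
                · exact absurd h hb0
                · exact h
              subst hb1
              have := hmem' s0 hb0s
              rw [pvMem_child] at this
              simp [pvMem, this]

lemma pv_wf_fresh : pvWF (.node false .leaf .leaf) :=
  ⟨trivial, trivial, fun h => absurd rfl h, fun h => absurd rfl h⟩

-- the insertion loop succeeds iff the codes are pairwise compatible with each other and with the trie
lemma pv_go_spec : ∀ (codes : List (List Char)) (T : PvTrie),
    (∀ c ∈ codes, pvIsBinA c = true) → (∃ t z o, T = .node t z o) → pvWF T →
    (pvTrieGo codes T = true ↔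
      codes.Pairwise pvR ∧
        ∀ c ∈ codes, ∀ s, pvIsBinA s = true → pvMem T s → ¬ s <+: c ∧ ¬ c <+: s) := by
  intro codes
  induction codes with
  | nil => intro T _ _ _; simp [pvTrieGo]
  | cons c rest ih =>
    intro T hbin hshape hwf
    obtain ⟨t, z, o, rfl⟩ := hshape
    have hc : pvIsBinA c = true := hbin c (by simp)
    have hrest : ∀ c' ∈ rest, pvIsBinA c' = true := fun c' h => hbin c' (by simp [h])
    have spec := pv_ins_spec c t z o hc hwf
    cases hins : pvIns (.node t z o) c with
    | none =>
      obtain ⟨s, hbs, hms, hrel⟩ := spec.1.mp hins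
      simp only [pvTrieGo, hins]
      constructor
      · intro h; exact absurd h (by simp)
      · rintro ⟨_, hcomp⟩
        obtain ⟨h1, h2⟩ := hcomp c (by simp) s hbs hms
        rcases hrel with h | h
        · exact absurd h h1
        · exact absurd h h2
    | some T' =>
      obtain ⟨hshape', hwf', hmem'⟩ := spec.2 T' hins
      have hIH := ih T' hrest hshape' hwf'
      have hgo : pvTrieGo (c :: rest) (.node t z o) = pvTrieGo rest T' := by
        simp [pvTrieGo, hins]
      rw [hgo, hIH]
      constructor
      · rintro ⟨hp, hcomp'⟩
        refine ⟨List.pairwise_cons.mpr ⟨?_, hp⟩, ?_⟩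
        · intro c' hc'
          obtain ⟨h1, h2⟩ := hcomp' c' hc' c hc ((hmem' c hc).mpr (.inr rfl))
          exact ⟨h1, h2⟩
        · intro c'' hc'' s hbs hms
          rcases List.mem_cons.mp hc'' with rfl | hmem
          · by_contra hcon
            rcases not_and_or.mp hcon with h | h
            · rw [spec.1.mpr ⟨s, hbs, hms, .inl (not_not.mp h)⟩] at hins; cases hins
            · rw [spec.1.mpr ⟨s, hbs, hms, .inr (not_not.mp h)⟩] at hins; cases hins
          · exact hcomp' c'' hmem s hbs ((hmem' s hbs).mpr (.inl hms))
      · rintro ⟨hp, hcomp⟩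
        obtain ⟨hhead, htail⟩ := List.pairwise_cons.mp hp
        refine ⟨htail, ?_⟩
        intro c' hc' s hbs hms
        rcases (hmem' s hbs).mp hms with hmT | rfl
        · exact hcomp c' (by simp [hc']) s hbs hmT
        · exact ⟨(hhead c' hc').1, (hhead c' hc').2⟩

lemma pv_trie_iff (codes : List (List Char)) (hbin : ∀ c ∈ codes, pvIsBinA c = true) :
    pvPrefixFreeTrie codes = true ↔ codes.Pairwise pvR := by
  rw [pvPrefixFreeTrie,
    pv_go_spec codes _ hbin ⟨false, .leaf, .leaf, rfl⟩ pv_wf_fresh]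
  simp only [and_iff_left_iff_imp]
  intro _ c _ s _ hms
  exact absurd hms (pvMem_fresh s)

-- the char-validity tests of A and B decide the same condition (single-char core, then any string)
lemma pv_char_core (c : Char) :
    (PySem.Chars.strIsalpha [c] && pvStrIslower [c])
      = (!decide ([c] < ['a']) && !decide (['z'] < [c])) := by
  have h1 : ([c] < ['a']) ↔ c < 'a' := by
    constructor
    · intro h; cases h with
      | rel h => exact h
      | cons h => cases h
    · intro h; exact List.Lex.rel h
  have h2 : (['z'] < [c]) ↔ 'z' < c := by
    constructor
    · intro h; cases h with
      | rel h => exact h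
      | cons h => cases h
    · intro h; exact List.Lex.rel h
  simp only [h1, h2, PySem.Chars.strIsalpha, pvStrIslower, PySem.Chars.isalpha,
    PySem.Chars.islower, PySem.Chars.isupper, List.any_cons, List.any_nil, List.all_cons,
    List.all_nil, List.isEmpty_cons, Bool.not_false, Bool.true_and, Bool.and_true, Bool.or_false]
  simp only [Char.lt_def, Char.le_def]
  rcases c with ⟨v, hv⟩
  rw [Bool.eq_iff_iff]
  simp only [Bool.and_eq_true, Bool.or_eq_true, Bool.not_eq_true', decide_eq_true_eq,
    Bool.and_eq_false_iff, decide_eq_false_iff_not, UInt32.le_iff_toNat_le, UInt32.lt_iff_toNat_lt]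
  have e1 : 'a'.val.toNat = 97 := rfl
  have e2 : 'z'.val.toNat = 122 := rfl
  have e3 : 'A'.val.toNat = 65 := rfl
  have e4 : 'Z'.val.toNat = 90 := rfl
  rw [e1, e2, e3, e4]
  omega

lemma pv_char_cond (ch : List Char) :
    (ch.length != 1 || !PySem.Chars.strIsalpha ch || !pvStrIslower ch)
      = (ch.length != 1 || !(!decide (ch < ['a']) && !decide (['z'] < ch))) := by
  match ch with
  | [] => rfl
  | [c] =>
    have := pv_char_core c
    simp only [List.length_cons, List.length_nil, bne_self_eq_false, Bool.false_or,
      ← Bool.not_and, this]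
  | c :: d :: t => simp

-- the binary tests of A and B decide the same condition
lemma pv_bin_cond (cs : List Char) : (!pvIsBinA cs) = decide (pvBinLeft cs ≠ []) := by
  rw [Bool.eq_iff_iff]
  simp only [decide_eq_true_eq]
  constructor
  · intro h
    rw [Bool.not_eq_true', pvIsBinA, List.all_eq_false] at h
    obtain ⟨c, hc, hne⟩ := h
    have hm : c ∈ pvBinLeft cs := by
      rw [pvBinLeft, PySem.Set.mem_diff, PySem.Set.mem_ofList]
      exact ⟨hc, by simpa using hne⟩
    exact List.ne_nil_of_mem hm
  · intro h
    obtain ⟨c, hc⟩ := List.exists_mem_of_ne_nil _ h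
    rw [pvBinLeft, PySem.Set.mem_diff, PySem.Set.mem_ofList] at hc
    rw [Bool.not_eq_true', pvIsBinA, List.all_eq_false]
    exact ⟨c, hc.1, by simpa using hc.2⟩

-- the parse loops agree given dict keys = taken set and dict values = collected codes (all binary)
lemma pv_parse_rel (ls : List (List Char)) (d : PySem.Dict (List Char) (List Char))
    (acc : List (List Char)) (taken : PySem.Set (List Char))
    (hk : d.keys = taken) (hv : d.values = acc) (hb : ∀ c ∈ acc, pvIsBinA c = true) :
    (∃ e, pvParseA ls d = .inr (false, e) ∧ pvParseB ls acc taken = .inr e) ∨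
    (∃ d', pvParseA ls d = .inl d' ∧ pvParseB ls acc taken = .inl d'.values ∧
      ∀ c ∈ d'.values, pvIsBinA c = true) := by
  induction ls generalizing d acc taken with
  | nil => subst hv; exact .inr ⟨d, rfl, rfl, hb⟩
  | cons line rest ih =>
    have hdup : ∀ ch, d.contains ch = PySem.Set.contains taken ch := by
      intro ch
      rw [Bool.eq_iff_iff, PySem.Set.contains_iff taken ch, ← hk]
      simp [PySem.Dict.contains, PySem.Dict.keys, List.any_eq_true, List.mem_map, beq_iff_eq]
    simp only [pvParseA, pvParseB]
    rcases hsp : PySem.Chars.split₀ (PySem.Chars.strip line) with _ | ⟨ch, _ | ⟨code, _ | t⟩⟩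
    · exact .inl ⟨_, rfl, rfl⟩
    · exact .inl ⟨_, rfl, rfl⟩
    · dsimp only
      rw [pv_char_cond ch]
      by_cases hcc : (ch.length != 1 || !(!decide (ch < ['a']) && !decide (['z'] < ch))) = true
      · rw [if_pos hcc, if_pos hcc]; exact .inl ⟨_, rfl, rfl⟩
      · rw [if_neg hcc, if_neg hcc, pv_bin_cond code]
        by_cases hbb : (decide (pvBinLeft code ≠ [])) = true
        · rw [if_pos hbb, if_pos hbb]; exact .inl ⟨_, rfl, rfl⟩
        · rw [if_neg hbb, if_neg hbb, hdup ch]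
          by_cases hd : PySem.Set.contains taken ch = true
          · rw [if_pos hd, if_pos hd]; exact .inl ⟨_, rfl, rfl⟩
          · rw [if_neg hd, if_neg hd]
            have hfresh : d.contains ch = false := by rw [hdup ch, Bool.eq_false_iff]; exact hd
            have hkeys : (d.insert ch code).keys = d.keys ++ [ch] := by
              rw [PySem.Dict.insert]; simp [hfresh, PySem.Dict.keys]
            have hvals : (d.insert ch code).values = d.values ++ [code] := by
              rw [PySem.Dict.insert]; simp [hfresh, PySem.Dict.values]
            have hnm : ch ∉ taken := by
              intro hm; exact hd ((PySem.Set.contains_iff taken ch).mpr hm)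
            have hcode : pvIsBinA code = true := by
              have h := pv_bin_cond code
              rw [Bool.not_eq_true] at hbb
              rw [hbb] at h
              simpa using h
            refine ih (d.insert ch code) (acc ++ [code]) (PySem.Set.add taken ch)
              (by rw [hkeys, hk, PySem.Set.add_of_not_mem hnm])
              (by rw [hvals, hv]) ?_
            intro c hcm
            rcases List.mem_append.mp hcm with h | h
            · exact hb c h
            · simp only [List.mem_singleton] at h; subst h; exact hcode
    · exact .inl ⟨_, rfl, rfl⟩

-- A's length-sorted all-pairs scan decides pairwise prefix-compatibility
lemma pv_go_iff (l : List (List Char)) :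
    pvPpfGo l = true ↔ l.Pairwise (fun a b => ¬ a <+: b) := by
  induction l with
  | nil => simp [pvPpfGo]
  | cons c rest ih =>
    have hsw : ∀ x : List Char, (PySem.Chars.startswith x c = false) ↔ ¬ c <+: x := by
      intro x
      rw [← PySem.Chars.startswith_iff (s := x) (p := c), Bool.eq_false_iff]
    simp [pvPpfGo, List.pairwise_cons, ih, List.all_eq_true, hsw]

lemma pv_LA (l : List (List Char)) (hs : l.Pairwise (fun a b => a.length ≤ b.length)) :
    (l.Pairwise (fun a b => ¬ a <+: b)) ↔ l.Pairwise pvR := by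
  constructor
  · intro hp
    refine (hs.and hp).imp ?_
    rintro a b ⟨hlen, hnp⟩
    refine ⟨hnp, fun hba => ?_⟩
    have : b = a := List.IsPrefix.eq_of_length_le hba hlen
    exact hnp (this ▸ hba)
  · exact fun hp => hp.imp And.left

lemma pv_A_iff (codes : List (List Char)) :
    pvIsPrefixFreeA codes = true ↔ codes.Pairwise pvR := by
  have hR : Symmetric pvR := fun a b h => ⟨h.2, h.1⟩
  rw [pvIsPrefixFreeA, pv_go_iff,
    pv_LA _ (PySem.List.sorted_pairwise codes (fun s => s.length))]
  exact List.Perm.pairwise_iff (fun h => hR h) (PySem.List.sorted_perm codes (fun s => s.length) false)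

-- both prefix-free checks agree on lists of binary codes
lemma pv_pf_eq (codes : List (List Char)) (hbin : ∀ c ∈ codes, pvIsBinA c = true) :
    pvIsPrefixFreeA codes = pvPrefixFreeTrie codes := by
  have h1 := pv_A_iff codes
  have h2 := pv_trie_iff codes hbin
  cases hx : pvIsPrefixFreeA codes <;> cases hy : pvPrefixFreeTrie codes <;> simp_all

-- lines[-1] of A is lines[n + 1] of B when len(lines) = n + 2
lemma pv_last_eq (L : List (List Char)) (n : Int) (hne : L ≠ [])
    (hL : (L.length : Int) = n + 2) :
    (PySem.List.pyGet? L (-1)).getD [] = PySem.List.pyGetD L (n + 1) ([] : List Char) := by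
  have hpos : 1 ≤ L.length := List.length_pos_of_ne_nil hne
  have h2 : (0 : Int) ≤ n + 1 := by omega
  have h3 : n + 1 < (L.length : Int) := by omega
  have hlen : L.length - 1 < L.length := by omega
  rw [PySem.List.pyGetD_eq_getElem L [] h2 h3, PySem.List.pyGet?_neg_one,
    List.getLast?_eq_getElem?, List.getElem?_eq_getElem hlen]
  simp only [Option.getD_some]
  congr 1
  omega

-- ===== VERDICT (by name: the statement is the Claim_ definition above) =====
theorem check_student_answer_huffman_spec : Claim_equal_check_student_answer_huffman := by
  intro m sa _
  show check_student_answer_huffman m sa = check_student_answer_huffman_alt m sa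
  simp only [check_student_answer_huffman, check_student_answer_huffman_alt, pvJudge]
  generalize PySem.Chars.splitOn (PySem.Chars.strip sa.toList) ['\n'] = L
  rcases h0 : PySem.Int.ofChars? (L.headD []) with _ | n
  · rfl
  have hne : L ≠ [] := by
    intro h
    rw [h] at h0
    have hnil : PySem.Int.ofChars? (([] : List (List Char)).headD []) = none := by decide
    rw [hnil] at h0
    cases h0
  by_cases hgt : n > 26
  · simp only [if_pos hgt]
  · simp only [if_neg hgt]
    by_cases hlen : ((L.length : Int) != n + 2) = true
    · simp only [if_pos hlen]
    · simp only [if_neg hlen]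
      have hLn : (L.length : Int) = n + 2 := by simpa using hlen
      have hsl : (1 : Int) + n = n + 1 := by ring
      rw [hsl]
      rcases pv_parse_rel (PySem.List.slice L (some 1) (some (n + 1)))
          PySem.Dict.empty [] PySem.Set.empty rfl rfl (by simp) with
        ⟨e, hA, hB⟩ | ⟨d', hA, hB, hbin⟩
      · simp only [hA, hB]
      · simp only [hA, hB]
        rw [pv_pf_eq d'.values hbin, pv_bin_cond, pv_last_eq L n hne hLn]
        by_cases hpf : (!pvPrefixFreeTrie d'.values) = true
        · simp only [if_pos hpf]
        · simp only [if_neg hpf]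
          by_cases henc : (decide (pvBinLeft (PySem.List.pyGetD L (n + 1) ([] : List Char)) ≠ [])) = true
          · simp only [if_pos henc]
          · simp only [if_neg henc]
            by_cases hbits : (((PySem.List.pyGetD L (n + 1) ([] : List Char)).length : Int) != m) = true
            · simp only [if_pos hbits]
            · simp only [if_neg hbits]
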